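-- pv_equiv track=rewrite | github.com/singhsanket143/CppCompetitiveRepository | UnacademyCourse/SortingAndSearchingPythonJune2021/Lecture7/printing_copies.py | printing_copies
-- ===== SOURCE A (Python) =====
-- def possible(mid, n, x, y):
--     return (mid//x) + (mid//y) >= (n-1)
--
-- def printing_copies(n, x, y):
--     # O(log(max(x, y)*n))
--     if n == 1:
--         return min(x, y)
--
--     lo, hi = 0, max(x, y)*n
--     ans = 0
--     while lo <= hi:
--         mid = lo + (hi - lo)//2
--         if possible(mid, n, x, y):
--             ans = mid
--             hi = mid - 1
--         else:
--             lo = mid + 1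
--     return ans + min(x, y)
-- ===== SOURCE B (Python) =====
-- def printing_copies(n, x, y):
--     # Closed form, O(1). One copy (or fewer) needs only the faster printer.
--     # Otherwise the m = n-1 further copies are split between the printers:
--     # giving k copies to the x-printer finishes at max(k*x, (m-k)*y), and that
--     # V-shaped quantity is minimised at k0 = m*y // (x+y) (or k0+1).
--     if n <= 1:
--         return min(x, y)
--     m = n - 1
--     k = (m * y) // (x + y)
--     return min((m - k) * y, (k + 1) * x) + min(x, y)
-- ===== Notes on version B (the rewrite author's own statement) =====
-- stated objective: faster
-- what changed: Replaces the binary search over finishing times by an O(1) closed form: for n>=2 the optimal split gives k0=(n-1)*y//(x+y) copies to the x-printer, so the answer is min((n-1-k0)*y,(k0+1)*x)+min(x,y); for n<=1 it is min(x,y).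
-- outside the precondition, e.g. on printing_copies(3, -2, 5): A returns -2, B returns -10; on printing_copies(2, 0, 5): A raises ZeroDivisionError, B returns 0
import Mathlib
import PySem

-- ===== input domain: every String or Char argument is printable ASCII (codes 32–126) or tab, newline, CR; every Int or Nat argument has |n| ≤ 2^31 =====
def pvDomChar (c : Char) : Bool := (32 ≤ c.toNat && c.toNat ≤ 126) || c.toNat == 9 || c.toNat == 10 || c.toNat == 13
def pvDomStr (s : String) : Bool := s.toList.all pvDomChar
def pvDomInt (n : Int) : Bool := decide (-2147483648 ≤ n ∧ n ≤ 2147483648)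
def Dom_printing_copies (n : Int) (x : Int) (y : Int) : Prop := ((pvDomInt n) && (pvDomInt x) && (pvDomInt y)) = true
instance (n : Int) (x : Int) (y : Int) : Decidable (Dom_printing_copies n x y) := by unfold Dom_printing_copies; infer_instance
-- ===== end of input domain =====

-- B replaces A's binary search by an O(1) closed form for the optimal split of the
-- remaining copies between the two printers (objective: faster, asymptotic).

-- ===== PORT A =====
def possible (mid : Int) (n : Int) (x : Int) (y : Int) : Bool :=
  decide (PySem.Int.floordiv mid x + PySem.Int.floordiv mid y ≥ n - 1)

-- A's `while lo <= hi` loop, state (lo, hi, ans); terminates because hi+1-lo shrinks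
def pvLoopA (n x y : Int) (lo hi ans : Int) : Int :=
  if hLoop : lo ≤ hi then
    let mid := lo + PySem.Int.floordiv (hi - lo) 2
    if possible mid n x y then pvLoopA n x y lo (mid - 1) mid
    else pvLoopA n x y (mid + 1) hi ans
  else ans
termination_by (hi + 1 - lo).toNat
decreasing_by
  all_goals
    have h2 := PySem.Int.floordiv_two_mid_bounds (lo := (0:Int)) (hi := hi - lo) (by omega)
    simp only [zero_add] at h2
    omega

def printing_copies (n : Int) (x : Int) (y : Int) : Int :=
  if n = 1 then min x y
  else pvLoopA n x y 0 (max x y * n) 0 + min x y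

-- ===== PORT B =====
def printing_copies_alt (n : Int) (x : Int) (y : Int) : Int :=
  if n ≤ 1 then min x y
  else
    let m := n - 1
    let k := PySem.Int.floordiv (m * y) (x + y)
    min ((m - k) * y) ((k + 1) * x) + min x y

-- ===== PRECONDITION & SPEC =====
-- Pre_ excludes only inputs with n ≥ 2 and a print time x ≤ 0 or y ≤ 0: there x = 0
-- or y = 0 raises ZeroDivisionError, and a negative print time makes A's search
-- predicate non-monotone, so the value A's binary search lands on is an accident of
-- the implementation (n ≤ 0 with x = 0 or y = 0 also raises and is excluded).
def Pre_printing_copies (n : Int) (x : Int) (y : Int) : Prop :=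
  (1 ≤ x ∧ 1 ≤ y) ∨ n = 1 ∨ (n ≤ 0 ∧ x ≠ 0 ∧ y ≠ 0)
instance (n : Int) (x : Int) (y : Int) : Decidable (Pre_printing_copies n x y) := by
  unfold Pre_printing_copies; infer_instance

def pvWitness_printing_copies : Int × Int × Int := (4, 3, 2)

def Spec_printing_copies (n : Int) (x : Int) (y : Int) (out : Int) : Prop := out = printing_copies_alt n x y
instance (n : Int) (x : Int) (y : Int) (out : Int) : Decidable (Spec_printing_copies n x y out) := by unfold Spec_printing_copies; infer_instance

-- ===== CLAIM (what is proved, stated in full; the proofs are below) =====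
def Claim_equal_printing_copies : Prop := ∀ (n : Int) (x : Int) (y : Int), Dom_printing_copies n x y → Pre_printing_copies n x y → Spec_printing_copies n x y (printing_copies n x y)

-- ===== LEMMAS AND PROOFS =====

-- the count of pages printed by time t
def pvCount (x y t : Int) : Int := PySem.Int.floordiv t x + PySem.Int.floordiv t y

-- B's threshold: finishing time of the m-th extra copy under the optimal split
def pvT0 (m x y : Int) : Int :=
  min ((m - PySem.Int.floordiv (m * y) (x + y)) * y)
      ((PySem.Int.floordiv (m * y) (x + y) + 1) * x)

lemma pvFd_zero {x : Int} (hx : x ≠ 0) : PySem.Int.floordiv 0 x = 0 := by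
  rcases lt_or_gt_of_ne hx with h | h
  · rw [show (0:Int) = -0 from rfl, show x = -(-x) by ring, PySem.Int.floordiv_neg_neg,
      PySem.Int.floordiv_eq_ediv_of_pos (by omega)]
    simp
  · rw [PySem.Int.floordiv_eq_ediv_of_pos h]; simp

lemma pvCount_mono (x y : Int) (hx : 0 < x) (hy : 0 < y) {t t' : Int} (h : t ≤ t') :
    pvCount x y t ≤ pvCount x y t' := by
  unfold pvCount
  have h1 : PySem.Int.floordiv t x ≤ PySem.Int.floordiv t' x := by
    rw [PySem.Int.le_floordiv_iff_mul_le hx]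
    have := (PySem.Int.le_floordiv_iff_mul_le hx (q := PySem.Int.floordiv t x) (a := t)).mp le_rfl
    omega
  have h2 : PySem.Int.floordiv t y ≤ PySem.Int.floordiv t' y := by
    rw [PySem.Int.le_floordiv_iff_mul_le hy]
    have := (PySem.Int.le_floordiv_iff_mul_le hy (q := PySem.Int.floordiv t y) (a := t)).mp le_rfl
    omega
  omega

-- basic bounds on k0 = m*y // (x+y)
lemma pvK0_bounds (m x y : Int) (hm : 0 ≤ m) (hx : 1 ≤ x) (hy : 1 ≤ y) :
    0 ≤ PySem.Int.floordiv (m * y) (x + y) ∧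
    PySem.Int.floordiv (m * y) (x + y) ≤ m ∧
    PySem.Int.floordiv (m * y) (x + y) * (x + y) ≤ m * y ∧
    m * y < (PySem.Int.floordiv (m * y) (x + y) + 1) * (x + y) := by
  set k := PySem.Int.floordiv (m * y) (x + y) with hk
  have hxy : (0:Int) < x + y := by omega
  have hlo : k * (x + y) ≤ m * y :=
    (PySem.Int.le_floordiv_iff_mul_le hxy).mp le_rfl
  have hhi : m * y < (k + 1) * (x + y) :=
    (PySem.Int.floordiv_lt_iff_lt_mul hxy (a := m * y) (q := k + 1)).mp (by omega)
  have hmy : 0 ≤ m * y := mul_nonneg hm (by omega)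
  have hk0 : 0 ≤ k := by
    rw [hk, PySem.Int.le_floordiv_iff_mul_le hxy]; simpa using hmy
  refine ⟨hk0, ?_, hlo, hhi⟩
  -- k ≤ m : else k ≥ m+1, and k*(x+y) ≥ (m+1)*(x+y) > m*y
  by_contra hcon
  have h1 : (m + 1) * (x + y) ≤ k * (x + y) :=
    mul_le_mul_of_nonneg_right (by omega) (le_of_lt hxy)
  have h2 : m * y < (m + 1) * (x + y) := by nlinarith
  omega

-- the closed-form threshold satisfies the predicate
lemma pvT0_possible (m x y : Int) (hm : 0 ≤ m) (hx : 1 ≤ x) (hy : 1 ≤ y) :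
    m ≤ pvCount x y (pvT0 m x y) := by
  obtain ⟨hk0, hkm, hlo, hhi⟩ := pvK0_bounds m x y hm hx hy
  set k := PySem.Int.floordiv (m * y) (x + y) with hkdef
  have hxp : (0:Int) < x := by omega
  have hyp : (0:Int) < y := by omega
  unfold pvT0 pvCount
  rw [← hkdef]
  rcases le_total ((m - k) * y) ((k + 1) * x) with hmin | hmin
  · rw [min_eq_left hmin]
    have h1 : k ≤ PySem.Int.floordiv ((m - k) * y) x := by
      rw [PySem.Int.le_floordiv_iff_mul_le hxp]; nlinarith
    have h2 : m - k ≤ PySem.Int.floordiv ((m - k) * y) y := by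
      rw [PySem.Int.le_floordiv_iff_mul_le hyp]
    omega
  · rw [min_eq_right hmin]
    have h1 : k + 1 ≤ PySem.Int.floordiv ((k + 1) * x) x := by
      rw [PySem.Int.le_floordiv_iff_mul_le hxp]
    have h2 : m - (k + 1) ≤ PySem.Int.floordiv ((k + 1) * x) y := by
      rw [PySem.Int.le_floordiv_iff_mul_le hyp]; nlinarith
    omega

-- the closed-form threshold is minimal
lemma pvT0_least (m x y : Int) (hm : 0 ≤ m) (hx : 1 ≤ x) (hy : 1 ≤ y)
    {t : Int} (ht : m ≤ pvCount x y t) : pvT0 m x y ≤ t := by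
  obtain ⟨hk0, hkm, hlo, hhi⟩ := pvK0_bounds m x y hm hx hy
  set k := PySem.Int.floordiv (m * y) (x + y) with hkdef
  have hxp : (0:Int) < x := by omega
  have hyp : (0:Int) < y := by omega
  set a := PySem.Int.floordiv t x with ha
  set b := PySem.Int.floordiv t y with hb
  have hax : a * x ≤ t := (PySem.Int.le_floordiv_iff_mul_le hxp).mp le_rfl
  have hby : b * y ≤ t := (PySem.Int.le_floordiv_iff_mul_le hyp).mp le_rfl
  unfold pvCount at ht
  rw [← ha, ← hb] at ht
  unfold pvT0
  rw [← hkdef]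
  rcases le_or_gt (k + 1) a with hca | hca
  · have : (k + 1) * x ≤ a * x := mul_le_mul_of_nonneg_right hca (by omega)
    have := min_le_right ((m - k) * y) ((k + 1) * x)
    omega
  · have hbk : m - k ≤ b := by omega
    have : (m - k) * y ≤ b * y := mul_le_mul_of_nonneg_right hbk (by omega)
    have := min_le_left ((m - k) * y) ((k + 1) * x)
    omega

lemma pvT0_nonneg (m x y : Int) (hm : 0 ≤ m) (hx : 1 ≤ x) (hy : 1 ≤ y) :
    0 ≤ pvT0 m x y := by
  obtain ⟨hk0, hkm, _, _⟩ := pvK0_bounds m x y hm hx hy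
  unfold pvT0
  have h1 : (0:Int) ≤ (m - PySem.Int.floordiv (m * y) (x + y)) * y :=
    mul_nonneg (by omega) (by omega)
  have h2 : (0:Int) ≤ (PySem.Int.floordiv (m * y) (x + y) + 1) * x :=
    mul_nonneg (by omega) (by omega)
  omega

lemma pvT0_le_hi (n x y : Int) (hn : 1 ≤ n) (hx : 1 ≤ x) (hy : 1 ≤ y) :
    pvT0 (n - 1) x y ≤ max x y * n := by
  obtain ⟨hk0, hkm, _, _⟩ := pvK0_bounds (n - 1) x y (by omega) hx hy
  unfold pvT0
  have h1 : (n - 1 - PySem.Int.floordiv ((n - 1) * y) (x + y)) * y ≤ max x y * n := by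
    have hym : y ≤ max x y := le_max_right x y
    nlinarith [le_max_left x y]
  have := min_le_left ((n - 1 - PySem.Int.floordiv ((n - 1) * y) (x + y)) * y)
      ((PySem.Int.floordiv ((n - 1) * y) (x + y) + 1) * x)
  omega

-- A's loop returns pvT0 (n-1) whenever the invariant holds
lemma pvLoopA_eq (n x y : Int) (hn : 1 ≤ n) (hx : 1 ≤ x) (hy : 1 ≤ y) :
    ∀ (lo hi ans : Int), lo ≤ pvT0 (n - 1) x y → (pvT0 (n - 1) x y ≤ hi ∨ ans = pvT0 (n - 1) x y) →
      pvLoopA n x y lo hi ans = pvT0 (n - 1) x y := by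
  intro lo hi ans
  induction lo, hi, ans using pvLoopA.induct n x y with
  | case1 lo hi ans hLoop mid hposs ih =>
    intro hlo hhi
    have hmb := PySem.Int.floordiv_two_mid_bounds (lo := (0:Int)) (hi := hi - lo) (by omega)
    simp only [zero_add] at hmb
    have hmid : lo ≤ mid ∧ mid ≤ hi := by simp only [mid]; omega
    rw [pvLoopA]
    simp only [dif_pos hLoop]
    rw [if_pos (show possible (lo + PySem.Int.floordiv (hi - lo) 2) n x y = true from hposs)]
    -- possible mid: mid satisfies the predicate, so pvT0 ≤ mid
    have hp : n - 1 ≤ pvCount x y mid := by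
      have := of_decide_eq_true hposs
      unfold pvCount; omega
    have hle := pvT0_least (n - 1) x y (by omega) hx hy hp
    exact ih hlo (by omega)
  | case2 lo hi ans hLoop mid hposs ih =>
    intro hlo hhi
    have hmb := PySem.Int.floordiv_two_mid_bounds (lo := (0:Int)) (hi := hi - lo) (by omega)
    simp only [zero_add] at hmb
    have hmid : lo ≤ mid ∧ mid ≤ hi := by simp only [mid]; omega
    rw [pvLoopA]
    simp only [dif_pos hLoop]
    rw [if_neg (show ¬ possible (lo + PySem.Int.floordiv (hi - lo) 2) n x y = true from hposs)]
    -- ¬possible mid: by monotonicity pvT0 > mid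
    have hnp : ¬ (n - 1 ≤ pvCount x y mid) := by
      intro hcon
      exact hposs (decide_eq_true (by unfold pvCount at hcon; omega))
    have hgt : mid < pvT0 (n - 1) x y := by
      by_contra hcon
      exact hnp (le_trans (pvT0_possible (n - 1) x y (by omega) hx hy)
        (pvCount_mono x y (by omega) (by omega) (by omega : pvT0 (n - 1) x y ≤ mid)))
    refine ih (by omega) ?_
    rcases hhi with h | h
    · left; exact h
    · right; exact h
  | case3 lo hi ans hLoop =>
    intro hlo hhi
    rw [pvLoopA]
    simp only [dif_neg hLoop]
    rcases hhi with h | h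
    · omega
    · exact h

-- ceiling bound: possible holds on the lower half of [0, max x y * n] when n, x, y < 0
lemma pvPrefix_neg (n x y t : Int) (_hn : n ≤ -1) (hx : x ≤ -1) (hy : y ≤ -1)
    (ht : 0 ≤ t) (h2 : 2 * t ≤ max x y * n + 1) : possible t n x y = true := by
  have ha : (0:Int) < -x := by omega
  have hb : (0:Int) < -y := by omega
  have hm0 : max x y = -(min (-x) (-y)) := by omega
  set a := -x with hadef
  set b := -y with hbdef
  set m0 := min a b with hm0def
  have hm0p : (0:Int) < m0 := by rw [hm0def]; omega
  have hm0a : m0 ≤ a := min_le_left a b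
  have hm0b : m0 ≤ b := min_le_right a b
  -- 2*t ≤ m0*(-n) + 1
  have h2' : 2 * t ≤ m0 * (-n) + 1 := by
    have : max x y * n = m0 * (-n) := by rw [hm0, hm0def]; ring
    omega
  -- ceilings c1 = ⌈t/a⌉, c2 = ⌈t/b⌉, cm = ⌈t/m0⌉
  set c1 := PySem.Int.floordiv (t + a - 1) a with hc1def
  set c2 := PySem.Int.floordiv (t + b - 1) b with hc2def
  set cm := PySem.Int.floordiv (t + m0 - 1) m0 with hcmdef
  have hc1lo : c1 * a ≤ t + a - 1 := (PySem.Int.le_floordiv_iff_mul_le ha).mp le_rfl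
  have hc2lo : c2 * b ≤ t + b - 1 := (PySem.Int.le_floordiv_iff_mul_le hb).mp le_rfl
  have hcmlo : cm * m0 ≤ t + m0 - 1 := (PySem.Int.le_floordiv_iff_mul_le hm0p).mp le_rfl
  have hc1hi : t ≤ c1 * a := by
    have := (PySem.Int.floordiv_lt_iff_lt_mul ha (a := t + a - 1) (q := c1 + 1)).mp (by omega)
    nlinarith
  have hc2hi : t ≤ c2 * b := by
    have := (PySem.Int.floordiv_lt_iff_lt_mul hb (a := t + b - 1) (q := c2 + 1)).mp (by omega)
    nlinarith
  have hcmhi : t ≤ cm * m0 := by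
    have := (PySem.Int.floordiv_lt_iff_lt_mul hm0p (a := t + m0 - 1) (q := cm + 1)).mp (by omega)
    nlinarith
  have hcm0 : 0 ≤ cm := by
    rw [hcmdef, PySem.Int.le_floordiv_iff_mul_le hm0p]; omega
  -- c1, c2 ≤ cm
  have hc1cm : c1 ≤ cm := by
    have hta : t ≤ cm * a := le_trans hcmhi (mul_le_mul_of_nonneg_left hm0a hcm0)
    have := (PySem.Int.floordiv_lt_iff_lt_mul ha (a := t + a - 1) (q := cm + 1)).mpr (by nlinarith)
    omega
  have hc2cm : c2 ≤ cm := by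
    have htb : t ≤ cm * b := le_trans hcmhi (mul_le_mul_of_nonneg_left hm0b hcm0)
    have := (PySem.Int.floordiv_lt_iff_lt_mul hb (a := t + b - 1) (q := cm + 1)).mpr (by nlinarith)
    omega
  -- 2*cm ≤ -n + 1
  have h2cm : 2 * cm ≤ -n + 1 := by
    have h1 : 2 * cm * m0 < (-n + 2) * m0 := by nlinarith
    have := lt_of_mul_lt_mul_right h1 (le_of_lt hm0p)
    omega
  -- lower bounds on the two floordivs
  have hf1 : -c1 ≤ PySem.Int.floordiv t x := by
    rw [show t = -(-t) by ring, show x = -a by omega, PySem.Int.floordiv_neg_neg,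
      PySem.Int.le_floordiv_iff_mul_le ha]
    nlinarith
  have hf2 : -c2 ≤ PySem.Int.floordiv t y := by
    rw [show t = -(-t) by ring, show y = -b by omega, PySem.Int.floordiv_neg_neg,
      PySem.Int.le_floordiv_iff_mul_le hb]
    nlinarith
  unfold possible
  exact decide_eq_true (by omega)

-- with `possible` true on the lower half of every reached range, A's search walks to 0
lemma pvLoopA_zero (n x y : Int) : ∀ (k : Nat) (hi ans : Int), hi.toNat = k → 0 ≤ hi →
    (∀ t, 0 ≤ t → 2 * t ≤ hi + 1 → possible t n x y = true) →
    pvLoopA n x y 0 hi ans = 0 := by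
  intro k
  induction k using Nat.strong_induction_on with
  | _ k ih =>
    intro hi ans hk hhi hpre
    rw [pvLoopA]
    simp only [dif_pos hhi]
    have hfd : PySem.Int.floordiv (hi - 0) 2 = (hi - 0) / 2 :=
      PySem.Int.floordiv_eq_ediv_of_pos (by omega)
    have hmb : 0 ≤ 0 + PySem.Int.floordiv (hi - 0) 2 ∧
        2 * (0 + PySem.Int.floordiv (hi - 0) 2) ≤ hi + 1 ∧
        0 + PySem.Int.floordiv (hi - 0) 2 ≤ hi := by rw [hfd]; omega
    rw [if_pos (hpre _ hmb.1 hmb.2.1)]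
    by_cases hz : 0 + PySem.Int.floordiv (hi - 0) 2 = 0
    · rw [hz]
      rw [pvLoopA]
      norm_num
    · exact ih (0 + PySem.Int.floordiv (hi - 0) 2 - 1).toNat (by omega) _ _ rfl (by omega)
        (fun t ht h2 => hpre t ht (by omega))

-- ===== VERDICT (by name: the statement is the Claim_ definition above) =====
theorem printing_copies_spec : Claim_equal_printing_copies := by
  intro n x y _ hpre
  unfold Spec_printing_copies
  by_cases h1 : n = 1
  · -- both sides return min x y directly
    subst h1
    unfold printing_copies printing_copies_alt
    rw [if_pos rfl, if_pos (by omega : (1:Int) ≤ 1)]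
  by_cases h2 : 2 ≤ n
  · -- n ≥ 2: Pre_ forces 1 ≤ x and 1 ≤ y, and the binary search finds pvT0 (n-1)
    obtain ⟨hx, hy⟩ : 1 ≤ x ∧ 1 ≤ y := by
      rcases hpre with h | h | h
      · exact h
      · omega
      · omega
    have hB : printing_copies_alt n x y = pvT0 (n - 1) x y + min x y := by
      unfold printing_copies_alt pvT0
      rw [if_neg (by omega : ¬ n ≤ 1)]
    rw [hB]
    unfold printing_copies
    rw [if_neg h1,
      pvLoopA_eq n x y (by omega) hx hy 0 (max x y * n) 0
        (pvT0_nonneg (n - 1) x y (by omega) hx hy)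
        (Or.inl (pvT0_le_hi n x y (by omega) hx hy))]
  · -- n ≤ 0: both sides return min x y
    have hn0 : n ≤ 0 := by omega
    obtain ⟨hx0, hy0⟩ : x ≠ 0 ∧ y ≠ 0 := by
      rcases hpre with h | h | h
      · exact ⟨by omega, by omega⟩
      · omega
      · exact h.2
    have hB : printing_copies_alt n x y = min x y := by
      unfold printing_copies_alt
      rw [if_pos (by omega : n ≤ 1)]
    rw [hB]
    unfold printing_copies
    rw [if_neg h1]
    have hA : pvLoopA n x y 0 (max x y * n) 0 = 0 := by
      by_cases h3 : 0 ≤ max x y * n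
      · -- the loop runs; `possible` holds on the lower half of every reached range
        refine pvLoopA_zero n x y (max x y * n).toNat (max x y * n) 0 rfl h3 ?_
        intro t ht h2t
        by_cases h4 : n = 0
        · -- range is the single point 0
          have hmax0 : max x y * n = 0 := by rw [h4]; ring
          have ht0 : t = 0 := by omega
          subst ht0
          unfold possible
          rw [pvFd_zero hx0, pvFd_zero hy0]
          exact decide_eq_true (by omega)
        · -- n < 0 and 0 ≤ max x y * n force x, y < 0
          have hxy : x ≤ -1 ∧ y ≤ -1 := by
            by_contra hcon
            have hmax : 1 ≤ max x y := by
              rcases le_or_gt 1 x with h | h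
              · exact le_trans h (le_max_left x y)
              · have : 1 ≤ y := by omega
                exact le_trans this (le_max_right x y)
            have := mul_le_mul_of_nonpos_right hmax (by omega : n ≤ 0)
            omega
          exact pvPrefix_neg n x y t (by omega) hxy.1 hxy.2 ht h2t
      · -- empty range: the loop body never runs
        rw [pvLoopA]
        rw [dif_neg (by omega)]
    rw [hA]
    omega
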